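-- pv_equiv track=rewrite | github.com/s1h8t51/data_engineering_projects | python_practice/python_projects/timeseries_window_functions/finding_state_changes.py | train_status_change
-- ===== SOURCE A (Python) =====
-- def train_status_change(train_id,status):
--     l,r =0,1
--     change_status = 0
--     while r < len(status):
--         if status[l] != status[r]:
--             change_status += 1
--         l = r
--         r +=1
--     return change_status
-- ===== SOURCE B (Python) =====
-- from itertools import groupby
--
-- def train_status_change(train_id, status):
--     runs = sum(1 for _ in groupby(status))
--     return max(0, runs - 1)
-- ===== Notes on version B (the rewrite author's own statement) =====
-- stated objective: idiomatic
-- what changed: Replaces the index-pair while loop counting adjacent inequalities with itertools.groupby: collapse the sequence into runs of equal statuses and return max(0, runs - 1); groupby's C-level grouping gives a constant-factor speedup.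
import Mathlib
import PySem

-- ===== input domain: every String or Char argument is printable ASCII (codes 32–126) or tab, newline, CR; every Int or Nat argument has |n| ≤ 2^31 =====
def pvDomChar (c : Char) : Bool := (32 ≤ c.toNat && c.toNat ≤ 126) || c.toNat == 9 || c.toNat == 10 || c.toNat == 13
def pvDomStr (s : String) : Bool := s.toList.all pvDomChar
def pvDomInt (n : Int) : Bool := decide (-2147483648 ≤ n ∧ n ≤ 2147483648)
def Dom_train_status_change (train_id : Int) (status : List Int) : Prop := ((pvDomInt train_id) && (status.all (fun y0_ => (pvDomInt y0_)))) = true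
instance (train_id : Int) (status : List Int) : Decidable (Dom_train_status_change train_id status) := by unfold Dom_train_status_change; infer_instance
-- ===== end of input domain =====

-- B replaces A's index-pair while loop with a groupby-style run collapse: answer = max(0, runs - 1) (idiomatic decomposition, same O(n) cost).


-- ===== PORT A =====
-- the while loop: l, r walk in lockstep, r = l+1 always; indices are always in range, so pyGet?.getD 0 is exact
def pvLoopA (status : List Int) (l r : Nat) (acc : Int) : Int :=
  if _h : r < status.length then
    pvLoopA status r (r + 1)
      (if (PySem.List.pyGet? status (l : Int)).getD 0 ≠ (PySem.List.pyGet? status (r : Int)).getD 0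
       then acc + 1 else acc)
  else acc
termination_by status.length - r

def train_status_change (train_id : Int) (status : List Int) : Int :=
  pvLoopA status 0 1 0

-- ===== PORT B =====
-- groupby(status): collapse consecutive equal values into one representative per run
def pvRuns : List Int → List Int
  | [] => []
  | [x] => [x]
  | x :: y :: rest => if x = y then pvRuns (y :: rest) else x :: pvRuns (y :: rest)

def train_status_change_alt (train_id : Int) (status : List Int) : Int :=
  max 0 ((pvRuns status).length - 1 : Int)

-- ===== PRECONDITION & SPEC =====
def Spec_train_status_change (train_id : Int) (status : List Int) (out : Int) : Prop := out = train_status_change_alt train_id status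
instance (train_id : Int) (status : List Int) (out : Int) : Decidable (Spec_train_status_change train_id status out) := by unfold Spec_train_status_change; infer_instance

-- ===== CLAIM (what is proved, stated in full; the proofs are below) =====
def Claim_equal_train_status_change : Prop := ∀ (train_id : Int) (status : List Int), Dom_train_status_change train_id status → Spec_train_status_change train_id status (train_status_change train_id status)

-- ===== LEMMAS AND PROOFS =====

-- number of adjacent unequal pairs
def pvD : List Int → Int
  | x :: y :: rest => (if x ≠ y then 1 else 0) + pvD (y :: rest)
  | _ => 0

theorem pvRuns_length_pos (x : Int) (xs : List Int) : 1 ≤ (pvRuns (x :: xs)).length := by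
  induction xs generalizing x with
  | nil => simp [pvRuns]
  | cons y r ih =>
    simp only [pvRuns]
    split
    · exact ih y
    · simp

theorem pvD_eq_runs (xs : List Int) : pvD xs = max 0 ((pvRuns xs).length - 1 : Int) := by
  induction xs with
  | nil => simp [pvD, pvRuns]
  | cons x xs ih =>
    cases xs with
    | nil => simp [pvD, pvRuns]
    | cons y r =>
      by_cases hxy : x = y
      · subst hxy
        simpa [pvD, pvRuns] using ih
      · have hpos := pvRuns_length_pos y r
        simp only [pvD, pvRuns, if_neg hxy, if_pos hxy]
        rw [ih]
        simp only [List.length_cons]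
        omega

theorem pvLoopA_drop (status : List Int) (l : Nat) (acc : Int)
    (hl : l < status.length) :
    pvLoopA status l (l + 1) acc = acc + pvD (status.drop l) := by
  induction h : status.length - l generalizing l acc with
  | zero => omega
  | succ n ih =>
    rw [pvLoopA]
    by_cases hr : l + 1 < status.length
    · rw [dif_pos hr, ih (l + 1) _ hr (by omega)]
      have hget : ∀ (k : Nat) (hk : k < status.length),
          (PySem.List.pyGet? status (k : Int)).getD 0 = status[k]'hk := by
        intro k hk
        simp [PySem.List.pyGet?_natCast, List.getElem?_eq_getElem hk]
      have hdrop : status.drop l = status[l] :: status[l+1] :: status.drop (l + 2) := by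
        rw [List.drop_eq_getElem_cons hl, List.drop_eq_getElem_cons hr]
      rw [hget l hl, hget (l + 1) hr, hdrop]
      show _ = acc + pvD (status[l] :: status[l+1] :: status.drop (l + 2))
      rw [pvD]
      have : status.drop (l + 1) = status[l+1] :: status.drop (l + 2) :=
        List.drop_eq_getElem_cons hr
      rw [this]
      split_ifs with hne <;> ring
    · rw [dif_neg hr]
      have hdrop : status.drop l = [status[l]] := by
        rw [List.drop_eq_getElem_cons hl]
        have : status.drop (l + 1) = [] := List.drop_eq_nil_of_le (by omega)
        rw [this]
      rw [hdrop]
      simp [pvD]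

-- ===== VERDICT (by name: the statement is the Claim_ definition above) =====
theorem train_status_change_spec : Claim_equal_train_status_change := by
  intro train_id status _
  show train_status_change train_id status = train_status_change_alt train_id status
  unfold train_status_change train_status_change_alt
  cases status with
  | nil => simp [pvLoopA, pvRuns]
  | cons x xs =>
    rw [show (1 : Nat) = 0 + 1 from rfl, pvLoopA_drop _ 0 0 (by simp)]
    simpa using pvD_eq_runs (x :: xs)
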